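-- pv_equiv track=rewrite | github.com/Nilsson-Samuel/nerine-nor-er | src/evaluation/metrics.py | positive_pairs_from_memberships
-- ===== SOURCE A (Python) =====
-- from collections import defaultdict
-- from itertools import combinations
-- from typing import Any, Iterable, Mapping
--
-- PairKey = tuple[str, str]
--
-- def positive_pairs_from_memberships(
--     membership_by_entity: Mapping[str, str],
-- ) -> set[PairKey]:
--     """Expand cluster memberships into canonical positive pair keys."""
--     members_by_group: dict[str, list[str]] = defaultdict(list)
--     for entity_id, group_id in membership_by_entity.items():
--         members_by_group[str(group_id)].append(str(entity_id))
--
--     pairs: set[PairKey] = set()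
--     for entity_ids in members_by_group.values():
--         for entity_id_a, entity_id_b in combinations(sorted(entity_ids), 2):
--             pairs.add((entity_id_a, entity_id_b))
--     return pairs
-- ===== SOURCE B (Python) =====
-- def positive_pairs_from_memberships(membership_by_entity):
--     """Expand cluster memberships into canonical positive pair keys.
--
--     Alternative decomposition: no defaultdict grouping pass; walk the item
--     list once and, at the first occurrence of each group id, collect that
--     group's members by filtering the item list, then emit pairs by peeling
--     the head off the sorted member list.
--     """
--     items = [(str(entity_id), str(group_id))
--              for entity_id, group_id in membership_by_entity.items()]
--     pairs = set()
--     seen_groups = []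
--     for _, group_id in items:
--         if group_id in seen_groups:
--             continue
--         seen_groups.append(group_id)
--         members = sorted(e for e, g in items if g == group_id)
--         while members:
--             head, members = members[0], members[1:]
--             for other in members:
--                 pairs.add((head, other))
--     return pairs
-- ===== Notes on version B (the rewrite author's own statement) =====
-- stated objective: alternative
-- what changed: Replaces A's defaultdict-grouping pass plus combinations() pair enumeration with a single scan over the items that, at each group id's first occurrence, collects that group's members by filtering the item list and emits pairs by repeatedly peeling the head off the sorted member list.
import Mathlib
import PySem

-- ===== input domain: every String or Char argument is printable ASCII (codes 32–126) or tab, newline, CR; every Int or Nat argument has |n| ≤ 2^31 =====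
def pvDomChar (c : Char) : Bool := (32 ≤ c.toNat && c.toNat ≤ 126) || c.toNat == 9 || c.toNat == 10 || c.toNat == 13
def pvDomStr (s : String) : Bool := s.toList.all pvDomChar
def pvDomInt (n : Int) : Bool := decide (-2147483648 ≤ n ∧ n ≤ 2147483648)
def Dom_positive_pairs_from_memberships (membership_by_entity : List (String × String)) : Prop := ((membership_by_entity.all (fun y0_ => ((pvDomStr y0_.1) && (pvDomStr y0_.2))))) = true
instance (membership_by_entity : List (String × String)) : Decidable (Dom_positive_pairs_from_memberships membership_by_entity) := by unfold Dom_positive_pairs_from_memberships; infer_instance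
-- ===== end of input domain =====

-- B replaces A's defaultdict grouping by a one-pass first-occurrence scan that filters the
-- item list per group and peels pairs off the sorted member list (objective: alternative).
-- The input assoc list models the Python dict: both ports decode it via PySem.Dict.ofList.

-- ===== PORT A =====
-- str(entity_id)/str(group_id) on str values are identity and are ported as such.
def positive_pairs_from_memberships (membership_by_entity : List (String × String)) : List (String × String) :=
  let items := (PySem.Dict.ofList membership_by_entity).items
  -- members_by_group[str(group_id)].append(str(entity_id))
  let members_by_group : PySem.Dict String (List String) :=
    items.foldl (fun d p => PySem.Dict.modify d p.2 [] (· ++ [p.1])) PySem.Dict.empty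
  -- for entity_ids in members_by_group.values(): for a, b in combinations(sorted(entity_ids), 2): pairs.add((a, b))
  (PySem.Dict.values members_by_group).foldl
    (fun pairs entity_ids =>
      (PySem.List.combinations (PySem.List.sorted entity_ids (fun x => x) false) 2).foldl
        (fun pairs c =>
          match c with
          | [a, b] => PySem.Set.add pairs (a, b)   -- tuple unpacking of a 2-combination
          | _ => pairs)
        pairs)
    PySem.Set.empty

-- ===== PORT B =====
-- while members: head, members = members[0], members[1:]; for other in members: pairs.add((head, other))
def pvPeelPairs : List String → PySem.Set (String × String) → PySem.Set (String × String)
  | [], pairs => pairs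
  | head :: members, pairs =>
      pvPeelPairs members (members.foldl (fun s other => PySem.Set.add s (head, other)) pairs)

def positive_pairs_from_memberships_alt (membership_by_entity : List (String × String)) : List (String × String) :=
  let items := (PySem.Dict.ofList membership_by_entity).items
  -- for _, g in items: if g in seen_groups: continue; seen_groups.append(g); members = sorted(...); peel
  (items.foldl
    (fun (st : List String × PySem.Set (String × String)) p =>
      if st.1.contains p.2 then st
      else (st.1 ++ [p.2],
            pvPeelPairs
              (PySem.List.sorted ((items.filter (fun q => q.2 == p.2)).map (·.1)) (fun x => x) false)
              st.2))
    ([], PySem.Set.empty)).2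

-- ===== PRECONDITION & SPEC =====
def Spec_positive_pairs_from_memberships (membership_by_entity : List (String × String)) (out : List (String × String)) : Prop := out = positive_pairs_from_memberships_alt membership_by_entity
instance (membership_by_entity : List (String × String)) (out : List (String × String)) : Decidable (Spec_positive_pairs_from_memberships membership_by_entity out) := by unfold Spec_positive_pairs_from_memberships; infer_instance

-- ===== CLAIM (what is proved, stated in full; the proofs are below) =====
def Claim_equal_positive_pairs_from_memberships : Prop := ∀ (membership_by_entity : List (String × String)), Dom_positive_pairs_from_memberships membership_by_entity → Spec_positive_pairs_from_memberships membership_by_entity (positive_pairs_from_memberships membership_by_entity)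

-- ===== LEMMAS AND PROOFS =====

-- sorted member list of group g, as B computes it
def pvMembers (items : List (String × String)) (g : String) : List String :=
  PySem.List.sorted ((items.filter (fun q => q.2 == g)).map (·.1)) (fun x => x) false

-- peeling pairs off ms equals A's fold over combinations(ms, 2)
theorem pvPeel_eq_comb (ms : List String) (pairs : PySem.Set (String × String)) :
    (PySem.List.combinations ms 2).foldl
      (fun pairs c => match c with | [a, b] => PySem.Set.add pairs (a, b) | _ => pairs) pairs
    = pvPeelPairs ms pairs := by
  induction ms generalizing pairs with
  | nil => simp [PySem.List.combinations_nil_succ, pvPeelPairs]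
  | cons x xs ih =>
      rw [show (2 : Nat) = 1 + 1 from rfl] at *
      rw [PySem.List.combinations_cons_succ, PySem.List.combinations_one]
      rw [List.foldl_append, List.map_map, List.foldl_map]
      simp only [Function.comp]
      rw [ih]
      rfl

-- the group ids B actually processes, starting from seen
def pvFresh (seen : List String) : List String → List String
  | [] => []
  | g :: gs => if seen.contains g then pvFresh seen gs else g :: pvFresh (seen ++ [g]) gs

theorem pvUpdate_prefix (gs : List String) (seen : List String) :
    ∃ t, PySem.Set.update seen gs = seen ++ t := by
  induction gs generalizing seen with
  | nil => exact ⟨[], by simp [PySem.Set.update]⟩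
  | cons a as ih =>
      obtain ⟨t, ht⟩ := ih (PySem.Set.add seen a)
      by_cases h : a ∈ seen
      · refine ⟨t, ?_⟩
        simpa [PySem.Set.update, PySem.Set.add, h] using ht
      · refine ⟨a :: t, ?_⟩
        have : PySem.Set.add seen a = seen ++ [a] := by simp [PySem.Set.add, h]
        rw [show PySem.Set.update seen (a :: as) = PySem.Set.update (PySem.Set.add seen a) as from rfl,
            ht, this]
        simp

theorem pvFresh_eq_update (gs : List String) (seen : List String) :
    pvFresh seen gs = (PySem.Set.update seen gs).drop seen.length := by
  induction gs generalizing seen with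
  | nil => simp [pvFresh, PySem.Set.update]
  | cons g gs ih =>
      have hupdate : PySem.Set.update seen (g :: gs) = PySem.Set.update (PySem.Set.add seen g) gs := rfl
      by_cases h : g ∈ seen
      · have hadd : PySem.Set.add seen g = seen := by simp [PySem.Set.add, h]
        simp only [pvFresh, List.contains_eq_mem, h, decide_true, if_true, hupdate, hadd, ih]
      · have hadd : PySem.Set.add seen g = seen ++ [g] := by simp [PySem.Set.add, h]
        obtain ⟨t, ht⟩ := pvUpdate_prefix gs (seen ++ [g])
        simp only [pvFresh, List.contains_eq_mem, h, decide_false, Bool.false_eq_true, if_false]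
        rw [ih (seen ++ [g]), hupdate, hadd, ht, List.drop_left]
        rw [List.append_assoc, List.drop_left]
        rfl

-- B's fold with a seen-list equals folding pvPeelPairs over the fresh group ids
theorem pvAltLoop (items l : List (String × String)) (seen : List String)
    (pairs : PySem.Set (String × String)) :
    (l.foldl
      (fun (st : List String × PySem.Set (String × String)) p =>
        if st.1.contains p.2 then st
        else (st.1 ++ [p.2], pvPeelPairs (pvMembers items p.2) st.2))
      (seen, pairs)).2
    = (pvFresh seen (l.map (·.2))).foldl (fun pr g => pvPeelPairs (pvMembers items g) pr) pairs := by
  induction l generalizing seen pairs with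
  | nil => rfl
  | cons p l ih =>
      by_cases h : seen.contains p.2
      · simp only [List.foldl_cons, List.map_cons, pvFresh, h, if_true, ih]
      · simp only [List.foldl_cons, List.map_cons, pvFresh, h, ih, List.foldl_cons]
        simp

-- ===== VERDICT (by name: the statement is the Claim_ definition above) =====
theorem positive_pairs_from_memberships_spec : Claim_equal_positive_pairs_from_memberships := by
  intro m _
  unfold Spec_positive_pairs_from_memberships
  -- B side: reduce the seen-list fold to a fold over the fresh group ids
  have hB : positive_pairs_from_memberships_alt m
      = (pvFresh [] (((PySem.Dict.ofList m).items).map (·.2))).foldl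
          (fun pr g => pvPeelPairs (pvMembers ((PySem.Dict.ofList m).items) g) pr)
          PySem.Set.empty := by
    show (((PySem.Dict.ofList m).items).foldl
        (fun (st : List String × PySem.Set (String × String)) p =>
          if st.1.contains p.2 then st
          else (st.1 ++ [p.2], pvPeelPairs (pvMembers ((PySem.Dict.ofList m).items) p.2) st.2))
        ([], PySem.Set.empty)).2 = _
    exact pvAltLoop _ _ _ _
  -- A side
  set items := (PySem.Dict.ofList m).items with hitems
  have hD : (items.foldl (fun d p => PySem.Dict.modify d p.2 [] (· ++ [p.1])) PySem.Dict.empty)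
      = ((items.map Prod.swap).foldl
          (fun d q => PySem.Dict.modify d q.1 [] (· ++ [q.2])) PySem.Dict.empty) :=
    by rw [List.foldl_map]; rfl
  have hnodup : ((items.map Prod.swap).foldl
      (fun d q => PySem.Dict.modify d q.1 [] (· ++ [q.2])) PySem.Dict.empty).keys.Nodup := by
    exact PySem.Dict.nodup_keys_foldl_modify_key _ _ _ _ _ PySem.Dict.nodup_keys_empty
  have hkeys : ((items.map Prod.swap).foldl
      (fun d q => PySem.Dict.modify d q.1 [] (· ++ [q.2])) PySem.Dict.empty).keys
      = PySem.Set.update [] (items.map (·.2)) := by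
    rw [PySem.Dict.keys_foldl_modify_key]
    simp [PySem.Dict.keys_empty, List.map_map]
    rfl
  have hgetD : ∀ g, ((items.map Prod.swap).foldl
      (fun d q => PySem.Dict.modify d q.1 [] (· ++ [q.2])) PySem.Dict.empty).getD g []
      = (items.filter (fun q => q.2 == g)).map (·.1) := by
    intro g
    rw [PySem.Dict.getD_foldl_modify_append]
    rw [List.filter_map, List.map_map]
    simp [PySem.Dict.getD_empty]
    rfl
  have hvals : ((items.map Prod.swap).foldl
      (fun d q => PySem.Dict.modify d q.1 [] (· ++ [q.2])) PySem.Dict.empty).values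
      = (PySem.Set.update [] (items.map (·.2))).map
          (fun g => (items.filter (fun q => q.2 == g)).map (·.1)) := by
    rw [PySem.Dict.values_eq_map_keys _ hnodup [], hkeys]
    exact List.map_congr_left (fun g _ => hgetD g)
  have hA : positive_pairs_from_memberships m
      = (PySem.Set.update [] (items.map (·.2))).foldl
          (fun pr g => pvPeelPairs (pvMembers items g) pr) PySem.Set.empty := by
    show ((items.foldl (fun d p => PySem.Dict.modify d p.2 [] (· ++ [p.1]))
            PySem.Dict.empty).values).foldl
        (fun pairs entity_ids =>
          (PySem.List.combinations (PySem.List.sorted entity_ids (fun x => x) false) 2).foldl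
            (fun pairs c =>
              match c with
              | [a, b] => PySem.Set.add pairs (a, b)
              | _ => pairs)
            pairs)
        PySem.Set.empty = _
    rw [hD, hvals, List.foldl_map]
    exact List.foldl_ext _ _ _ (fun pairs g _ => pvPeel_eq_comb _ _)
  rw [hA, hB, pvFresh_eq_update]
  simp
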